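-- pv_equiv track=rewrite | github.com/chriskeh/AdventOfCode-2023 | day01/part2.py | get_rightmost_digit_from_line
-- ===== SOURCE A (Python) =====
-- def get_rightmost_digit_from_line(line):
--     # Walk over the string from right to left.  The idea is the same as in get_leftmost_digit_from_line()
--     number_words = ["zero", "one", "two", "three", "four", "five", "six", "seven", "eight", "nine"]
--
--     index = len(line) - 1
--     while index >= 0:
--         if line[index].isdecimal():
--             return int(line[index])
--         text_to_check = line[index:]
--         number = 0
--         while number < 10:
--             if text_to_check.startswith(number_words[number]):
--                 return number
--             number += 1
--         index -= 1
--     return -1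
-- ===== SOURCE B (Python) =====
-- def get_rightmost_digit_from_line(line):
--     # Candidate generation: last start of each spelled word via rfind, plus every
--     # decimal digit position; the candidate with the greatest index wins.
--     number_words = ["zero", "one", "two", "three", "four", "five", "six", "seven", "eight", "nine"]
--     best_idx, best_val = -1, -1
--     for value, word in enumerate(number_words):
--         idx = line.rfind(word)
--         if idx > best_idx:
--             best_idx, best_val = idx, value
--     for idx, ch in enumerate(line):
--         if ch.isdecimal() and idx > best_idx:
--             best_idx, best_val = idx, int(ch)
--     return best_val
-- ===== Notes on version B (the rewrite author's own statement) =====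
-- stated objective: faster
-- what changed: A walks the line right-to-left testing all ten number words at every position and returns at the first match; B instead generates candidates once (rfind of each spelled word plus a single scan for digit positions) and returns the value of the candidate with the greatest index, -1 if none.
import Mathlib
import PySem

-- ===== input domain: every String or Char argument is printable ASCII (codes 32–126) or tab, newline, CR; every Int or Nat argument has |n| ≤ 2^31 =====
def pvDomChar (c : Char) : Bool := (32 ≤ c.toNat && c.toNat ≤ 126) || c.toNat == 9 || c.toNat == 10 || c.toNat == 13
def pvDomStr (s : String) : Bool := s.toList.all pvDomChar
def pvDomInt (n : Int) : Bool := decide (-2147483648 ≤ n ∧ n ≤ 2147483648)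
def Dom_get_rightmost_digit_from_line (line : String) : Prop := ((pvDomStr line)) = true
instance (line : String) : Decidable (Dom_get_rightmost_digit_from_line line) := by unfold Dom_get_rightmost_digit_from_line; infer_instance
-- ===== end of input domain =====

-- B replaces A's right-to-left walk with early return (a 10-word scan at every position)
-- by candidate generation: one rfind per spelled word plus one digit scan, then selection
-- of the candidate with the greatest index (objective: faster by a constant factor,
-- measured: C-level rfind scans replace per-position interpreted loops).

-- ===== PORT A =====
-- A's number_words list
def pvWordsA : List (List Char) :=
  ["zero".toList, "one".toList, "two".toList, "three".toList, "four".toList,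
   "five".toList, "six".toList, "seven".toList, "eight".toList, "nine".toList]

-- A's inner `while number < 10` loop: the scan over number_words with the running
-- index `number`, as the obvious structural recursion over the remaining words
def pvInnerA (t : List Char) (ws : List (List Char)) (number : Int) : Option Int :=
  match ws with
  | [] => none
  | w :: rest =>
    if PySem.Chars.startswith t w then some number else pvInnerA t rest (number + 1)

-- A's outer `while index >= 0` loop; the Nat argument is index + 1
def pvOuterA (l : List Char) : Nat → Int
  | 0 => -1
  | j + 1 =>
    -- line[index]: index = j is always in range here, so the getD default is never used;
    -- isdecimal = isdigit and int(line[index]) = code - 48: exact for ASCII (the stated domain)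
    if PySem.Chars.isdigit ((PySem.List.pyGet? l (j : Int)).getD ' ') then
      ((((PySem.List.pyGet? l (j : Int)).getD ' ').toNat : Int) - 48)
    else
      match pvInnerA (PySem.List.slice l (some (j : Int)) none) pvWordsA 0 with
      | some n => n
      | none => pvOuterA l j

def get_rightmost_digit_from_line (line : String) : Int :=
  pvOuterA line.toList line.toList.length

-- ===== PORT B =====
-- B's number_words list
def pvWordsB : List (List Char) :=
  ["zero".toList, "one".toList, "two".toList, "three".toList, "four".toList,
   "five".toList, "six".toList, "seven".toList, "eight".toList, "nine".toList]

def get_rightmost_digit_from_line_alt (line : String) : Int :=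
  let l := line.toList
  let s1 := (PySem.List.enumerate pvWordsB).foldl
    (fun (b : Int × Int) vw =>
      let idx := PySem.Chars.rfind l vw.2
      if b.1 < idx then (idx, vw.1) else b) (-1, -1)
  let s2 := (PySem.List.enumerate l).foldl
    (fun (b : Int × Int) ic =>
      if PySem.Chars.isdigit ic.2 ∧ b.1 < ic.1 then (ic.1, ((ic.2.toNat : Int) - 48)) else b) s1
  s2.2

-- ===== PRECONDITION & SPEC =====
def Spec_get_rightmost_digit_from_line (line : String) (out : Int) : Prop := out = get_rightmost_digit_from_line_alt line
instance (line : String) (out : Int) : Decidable (Spec_get_rightmost_digit_from_line line out) := by unfold Spec_get_rightmost_digit_from_line; infer_instance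

-- ===== CLAIM (what is proved, stated in full; the proofs are below) =====
def Claim_equal_get_rightmost_digit_from_line : Prop := ∀ (line : String), Dom_get_rightmost_digit_from_line line → Spec_get_rightmost_digit_from_line line (get_rightmost_digit_from_line line)

-- ===== LEMMAS AND PROOFS =====

-- value/word pairs, shared spec vocabulary of the proofs
def pvPairs : List (Int × List Char) :=
  [(0, "zero".toList), (1, "one".toList), (2, "two".toList), (3, "three".toList),
   (4, "four".toList), (5, "five".toList), (6, "six".toList), (7, "seven".toList),
   (8, "eight".toList), (9, "nine".toList)]

-- the value A's body produces at position i, if any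
def pvHit (l : List Char) (i : Nat) : Option Int :=
  l[i]?.bind (fun c =>
    if PySem.Chars.isdigit c then some ((c.toNat : Int) - 48)
    else pvPairs.findSome? (fun vw => if vw.2.isPrefixOf (l.drop i) then some vw.1 else none))

-- reference result: value of the rightmost position below k with a hit, else -1
def pvBest (l : List Char) : Nat → Int
  | 0 => -1
  | k + 1 => match pvHit l k with | some v => v | none => pvBest l k

lemma pvHit_some {l : List Char} {i : Nat} {c : Char} (h : l[i]? = some c) :
    pvHit l i = if PySem.Chars.isdigit c then some ((c.toNat : Int) - 48)
      else pvPairs.findSome? (fun vw => if vw.2.isPrefixOf (l.drop i) then some vw.1 else none) := by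
  unfold pvHit
  rw [h]
  rfl

lemma pv_enum_pairs : PySem.List.enumerate pvWordsB = pvPairs := by
  simp only [pvWordsB, pvPairs, PySem.List.enumerate_cons, PySem.List.enumerate_nil]
  norm_num

set_option maxRecDepth 8000 in
lemma pv_pairs_nonempty : ∀ vw ∈ pvPairs, vw.2 ≠ [] := by decide

lemma pv_pairs_head_not_digit :
    ∀ vw ∈ pvPairs, ∀ c : Char, vw.2.head? = some c → PySem.Chars.isdigit c = false := by
  intro vw hvw c hc
  fin_cases hvw <;> (injection hc with h; rw [← h]; decide)

set_option maxRecDepth 8000 in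
lemma pv_pairs_unique :
    ∀ vw ∈ pvPairs, ∀ vw' ∈ pvPairs, vw.2 <+: vw'.2 → vw = vw' := by
  have h : ∀ vw ∈ pvPairs, ∀ vw' ∈ pvPairs, vw.2.isPrefixOf vw'.2 = true → vw = vw' := by decide
  intro a ha b hb hp
  exact h a ha b hb (List.isPrefixOf_iff_prefix.mpr hp)

lemma pv_findSome_unique {α β : Type} (p : α → Option β) (xs : List α) (a : α) (v : β)
    (ha : a ∈ xs) (hv : p a = some v) (huniq : ∀ b ∈ xs, ∀ w, p b = some w → w = v) :
    xs.findSome? p = some v := by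
  induction xs with
  | nil => cases ha
  | cons x xs ih =>
    simp only [List.findSome?_cons]
    cases hx : p x with
    | some w => rw [huniq x List.mem_cons_self w hx]
    | none =>
      rcases List.mem_cons.mp ha with rfl | ha'
      · rw [hx] at hv; cases hv
      · exact ih ha' (fun b hb => huniq b (List.mem_cons_of_mem _ hb))

lemma pv_getElem_of_drop {l : List Char} {k : Nat} {x : Char} {xs : List Char}
    (h : l.drop k = x :: xs) : l[k]? = some x := by
  have h0 : (l.drop k)[0]? = some x := by rw [h]; rfl
  rw [List.getElem?_drop] at h0
  simpa using h0

lemma pv_hit_of_word {l : List Char} {j : Nat} {vw : Int × List Char}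
    (hm : vw ∈ pvPairs) (hp : vw.2 <+: l.drop j) : pvHit l j = some vw.1 := by
  obtain ⟨c, w', hw⟩ : ∃ c w', vw.2 = c :: w' := by
    cases h : vw.2 with
    | nil => exact absurd h (pv_pairs_nonempty vw hm)
    | cons c w' => exact ⟨c, w', rfl⟩
  obtain ⟨t, ht⟩ : ∃ t, l.drop j = c :: t := by
    rcases hp with ⟨t, ht⟩
    exact ⟨w' ++ t, by rw [← ht, hw]; rfl⟩
  have hlj : l[j]? = some c := pv_getElem_of_drop ht
  have hnd : PySem.Chars.isdigit c = false :=
    pv_pairs_head_not_digit vw hm c (by rw [hw]; rfl)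
  rw [pvHit_some hlj, hnd, if_neg (by simp)]
  refine pv_findSome_unique _ _ vw _ hm ?_ ?_
  · simp [List.isPrefixOf_iff_prefix, hp]
  · intro b hb w hbw
    by_cases hbp : b.2.isPrefixOf (l.drop j)
    · have hbpre : b.2 <+: l.drop j := List.isPrefixOf_iff_prefix.mp hbp
      have hbv : b = vw := by
        rcases List.prefix_or_prefix_of_prefix hbpre hp with h1 | h1
        · exact pv_pairs_unique b hb vw hm h1
        · exact (pv_pairs_unique vw hm b hb h1).symm
      simp only [hbp, if_true] at hbw
      obtain rfl : b.1 = w := Option.some.inj hbw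
      rw [hbv]
    · simp [hbp] at hbw

lemma pv_hit_none {l : List Char} {i : Nat}
    (hd : ∀ c, l[i]? = some c → PySem.Chars.isdigit c = false)
    (hw : ∀ vw ∈ pvPairs, ¬ vw.2 <+: l.drop i) : pvHit l i = none := by
  cases hc : l[i]? with
  | none => unfold pvHit; rw [hc]; rfl
  | some c =>
    rw [pvHit_some hc, hd c hc, if_neg (by simp)]
    rw [List.findSome?_eq_none_iff]
    intro vw hvw
    simp [List.isPrefixOf_iff_prefix, hw vw hvw]

lemma pv_best_none {l : List Char} {k : Nat} (h : ∀ i < k, pvHit l i = none) :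
    pvBest l k = -1 := by
  induction k with
  | zero => rfl
  | succ k ih =>
    unfold pvBest
    rw [h k (Nat.lt_succ_self k)]
    exact ih (fun i hi => h i (Nat.lt_succ_of_lt hi))

lemma pv_best_top {l : List Char} {j : Nat} {v : Int} : ∀ {k : Nat}, j < k →
    pvHit l j = some v → (∀ i, j < i → i < k → pvHit l i = none) → pvBest l k = v := by
  intro k
  induction k with
  | zero => omega
  | succ k ih =>
    intro hj hh ha
    unfold pvBest
    by_cases hjk : j = k
    · subst hjk; rw [hh]
    · rw [ha k (by omega) (Nat.lt_succ_self k)]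
      exact ih (by omega) hh (fun i h1 h2 => ha i h1 (Nat.lt_succ_of_lt h2))

-- ---- A's loops compute pvBest ----

lemma pv_innerA_ten (t : List Char) (w0 w1 w2 w3 w4 w5 w6 w7 w8 w9 : List Char) :
    pvInnerA t [w0, w1, w2, w3, w4, w5, w6, w7, w8, w9] 0 =
      List.findSome? (fun vw => if vw.2.isPrefixOf t then some vw.1 else none)
        [((0 : Int), w0), (1, w1), (2, w2), (3, w3), (4, w4),
         (5, w5), (6, w6), (7, w7), (8, w8), (9, w9)] := by
  simp only [pvInnerA, PySem.Chars.startswith_iff, List.findSome?_cons, List.findSome?_nil,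
    List.isPrefixOf_iff_prefix]
  by_cases h0 : w0 <+: t
  · norm_num [h0]
  · by_cases h1 : w1 <+: t
    · norm_num [h0, h1]
    · by_cases h2 : w2 <+: t
      · norm_num [h0, h1, h2]
      · by_cases h3 : w3 <+: t
        · norm_num [h0, h1, h2, h3]
        · by_cases h4 : w4 <+: t
          · norm_num [h0, h1, h2, h3, h4]
          · by_cases h5 : w5 <+: t
            · norm_num [h0, h1, h2, h3, h4, h5]
            · by_cases h6 : w6 <+: t
              · norm_num [h0, h1, h2, h3, h4, h5, h6]
              · by_cases h7 : w7 <+: t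
                · norm_num [h0, h1, h2, h3, h4, h5, h6, h7]
                · by_cases h8 : w8 <+: t
                  · norm_num [h0, h1, h2, h3, h4, h5, h6, h7, h8]
                  · by_cases h9 : w9 <+: t
                    · norm_num [h0, h1, h2, h3, h4, h5, h6, h7, h8, h9]
                    · norm_num [h0, h1, h2, h3, h4, h5, h6, h7, h8, h9]

lemma pv_innerA_eq (t : List Char) :
    pvInnerA t pvWordsA 0 =
      pvPairs.findSome? (fun vw => if vw.2.isPrefixOf t then some vw.1 else none) := by
  unfold pvWordsA pvPairs
  exact pv_innerA_ten t _ _ _ _ _ _ _ _ _ _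

lemma pv_outerA_eq (l : List Char) : ∀ k, k ≤ l.length → pvOuterA l k = pvBest l k := by
  intro k
  induction k with
  | zero => intro _; rfl
  | succ j ih =>
    intro hk
    have hj : j < l.length := hk
    have hc : l[j]? = some l[j] := List.getElem?_eq_getElem hj
    have hsl : PySem.List.slice l (some (j : Int)) none = l.drop j := by
      rw [PySem.List.slice_from l (by positivity)]
      simp
    unfold pvOuterA pvBest
    simp only [PySem.List.pyGet?_natCast, hc, Option.getD_some, hsl, pv_innerA_eq]
    rw [pvHit_some hc]
    by_cases hd : PySem.Chars.isdigit l[j]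
    · simp [hd]
    · simp only [hd, Bool.false_eq_true, if_false]
      cases hfs : pvPairs.findSome? (fun vw => if vw.2.isPrefixOf (l.drop j) then some vw.1 else none) with
      | some v => rfl
      | none => exact ih (Nat.le_of_lt hj)

-- ---- rfind: the highest occurrence ----

lemma pv_go_spec (s sub : List Char) : ∀ k : Nat,
    (PySem.Chars.rfind.go s sub k = -1 ∧ ∀ j ≤ k, ¬ sub <+: s.drop j)
    ∨ (∃ j : Nat, j ≤ k ∧ PySem.Chars.rfind.go s sub k = (j : Int) ∧ sub <+: s.drop j ∧
        ∀ j', j < j' → j' ≤ k → ¬ sub <+: s.drop j') := by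
  intro k
  induction k with
  | zero =>
    by_cases h : sub.isPrefixOf s
    · right
      refine ⟨0, le_refl 0, ?_, by simpa using List.isPrefixOf_iff_prefix.mp h, by omega⟩
      simp [PySem.Chars.rfind.go, h]
    · left
      constructor
      · simp [PySem.Chars.rfind.go, h]
      · intro j hj
        interval_cases j
        simpa using fun hp => h (List.isPrefixOf_iff_prefix.mpr hp)
  | succ k ih =>
    by_cases h : sub.isPrefixOf (s.drop (k + 1))
    · right
      refine ⟨k + 1, le_refl _, ?_, List.isPrefixOf_iff_prefix.mp h, by omega⟩
      simp [PySem.Chars.rfind.go, h]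
    · have hgo : PySem.Chars.rfind.go s sub (k + 1) = PySem.Chars.rfind.go s sub k := by
        simp [PySem.Chars.rfind.go, h]
      have hnp : ¬ sub <+: s.drop (k + 1) := fun hp => h (List.isPrefixOf_iff_prefix.mpr hp)
      rcases ih with ⟨he, hall⟩ | ⟨j, hjk, he, hp, habove⟩
      · left
        refine ⟨by rw [hgo]; exact he, ?_⟩
        intro j hj
        rcases Nat.lt_or_ge j (k + 1) with h1 | h1
        · exact hall j (by omega)
        · have : j = k + 1 := by omega
          subst this; exact hnp
      · right
        refine ⟨j, by omega, by rw [hgo]; exact he, hp, ?_⟩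
        intro j' h1 h2
        rcases Nat.lt_or_ge j' (k + 1) with h3 | h3
        · exact habove j' h1 (by omega)
        · have : j' = k + 1 := by omega
          subst this; exact hnp

lemma pv_no_prefix_past {s sub : List Char} (hs : sub ≠ []) {j : Nat}
    (hj : s.length ≤ j) : ¬ sub <+: s.drop j := by
  intro hp
  rw [List.drop_eq_nil_of_le hj] at hp
  exact hs (List.prefix_nil.mp hp)

lemma pv_rfind_spec (s sub : List Char) (hs : sub ≠ []) :
    (PySem.Chars.rfind s sub = -1 ∧ ∀ j : Nat, ¬ sub <+: s.drop j)
    ∨ (∃ j : Nat, j < s.length ∧ PySem.Chars.rfind s sub = (j : Int) ∧ sub <+: s.drop j ∧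
        ∀ j' : Nat, j < j' → ¬ sub <+: s.drop j') := by
  have hdef : PySem.Chars.rfind s sub = PySem.Chars.rfind.go s sub s.length := rfl
  rcases pv_go_spec s sub s.length with ⟨he, hall⟩ | ⟨j, hjk, he, hp, habove⟩
  · left
    refine ⟨by rw [hdef]; exact he, ?_⟩
    intro j
    rcases Nat.lt_or_ge j s.length with h1 | h1
    · exact hall j (by omega)
    · exact pv_no_prefix_past hs h1
  · right
    have hjlt : j < s.length := by
      rcases Nat.lt_or_ge j s.length with h1 | h1
      · exact h1
      · exact absurd hp (pv_no_prefix_past hs h1)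
    refine ⟨j, hjlt, by rw [hdef]; exact he, hp, ?_⟩
    intro j' h1
    rcases Nat.lt_or_ge j' s.length with h3 | h3
    · exact habove j' h1 (by omega)
    · exact pv_no_prefix_past hs h3

-- ---- invariant of B's word fold ----

def pvWInv (l : List Char) (done : List (Int × List Char)) (st : Int × Int) : Prop :=
  (st = (-1, -1) ∧ ∀ vw ∈ done, ∀ j : Nat, ¬ vw.2 <+: l.drop j)
  ∨ (∃ j : Nat, j < l.length ∧ st.1 = (j : Int) ∧ (∃ vw ∈ done, vw.2 <+: l.drop j ∧ st.2 = vw.1)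
      ∧ ∀ vw ∈ done, ∀ j' : Nat, (j : Int) < (j' : Int) → ¬ vw.2 <+: l.drop j')

lemma pv_wstep (l : List Char) (done : List (Int × List Char)) (st : Int × Int)
    (vw : Int × List Char) (hne : vw.2 ≠ []) (hinv : pvWInv l done st) :
    pvWInv l (done ++ [vw])
      (if st.1 < PySem.Chars.rfind l vw.2 then (PySem.Chars.rfind l vw.2, vw.1) else st) := by
  rcases pv_rfind_spec l vw.2 hne with ⟨he, hall⟩ | ⟨j0, hj0, he, hp, habove⟩
  · have hge : -1 ≤ st.1 := by
      rcases hinv with ⟨hst, _⟩ | ⟨j, _, hst, _⟩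
      · rw [hst]
      · rw [hst]; omega
    rw [he, if_neg (by omega)]
    rcases hinv with ⟨hst, hnone⟩ | ⟨j, hjl, hst, hex, hbound⟩
    · left
      refine ⟨hst, ?_⟩
      intro b hb j
      rcases List.mem_append.mp hb with h1 | h1
      · exact hnone b h1 j
      · rw [List.mem_singleton.mp h1]; exact hall j
    · right
      refine ⟨j, hjl, hst, ?_, ?_⟩
      · obtain ⟨b, hb, h1, h2⟩ := hex
        exact ⟨b, List.mem_append_left _ hb, h1, h2⟩
      · intro b hb j' hj'
        rcases List.mem_append.mp hb with h1 | h1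
        · exact hbound b h1 j' hj'
        · rw [List.mem_singleton.mp h1]; exact hall j'
  · rw [he]
    by_cases hlt : st.1 < (j0 : Int)
    · rw [if_pos hlt]
      right
      refine ⟨j0, hj0, rfl, ⟨vw, List.mem_append_right _ (by simp), hp, rfl⟩, ?_⟩
      intro b hb j' hj'
      have hj'gt : j0 < j' := by exact_mod_cast hj'
      rcases List.mem_append.mp hb with h1 | h1
      · rcases hinv with ⟨hst, hnone⟩ | ⟨j, hjl, hst, hex, hbound⟩
        · exact hnone b h1 j'
        · refine hbound b h1 j' ?_
          rw [← hst]
          exact lt_trans hlt hj'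
      · rw [List.mem_singleton.mp h1]; exact habove j' hj'gt
    · rw [if_neg hlt]
      rcases hinv with ⟨hst, _⟩ | ⟨j, hjl, hst, hex, hbound⟩
      · exfalso
        rw [hst] at hlt
        simp only [not_lt] at hlt
        have : (0 : Int) ≤ (j0 : Int) := by positivity
        omega
      · right
        refine ⟨j, hjl, hst, ?_, ?_⟩
        · obtain ⟨b, hb, h1, h2⟩ := hex
          exact ⟨b, List.mem_append_left _ hb, h1, h2⟩
        · intro b hb j' hj'
          rcases List.mem_append.mp hb with h1 | h1
          · exact hbound b h1 j' hj'
          · rw [List.mem_singleton.mp h1]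
            refine habove j' ?_
            rw [← hst] at hj'
            exact_mod_cast lt_of_le_of_lt (not_lt.mp hlt) hj'

lemma pv_wfold (l : List Char) : ∀ (ws done : List (Int × List Char)) (st : Int × Int),
    (∀ vw ∈ ws, vw.2 ≠ []) → pvWInv l done st →
    pvWInv l (done ++ ws)
      (ws.foldl (fun (b : Int × Int) vw =>
        let idx := PySem.Chars.rfind l vw.2
        if b.1 < idx then (idx, vw.1) else b) st) := by
  intro ws
  induction ws with
  | nil => intro done st _ h; simpa using h
  | cons vw ws ih =>
    intro done st hne hinv
    have hstep := pv_wstep l done st vw (hne vw List.mem_cons_self) hinv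
    have := ih (done ++ [vw]) _ (fun b hb => hne b (List.mem_cons_of_mem _ hb)) hstep
    simpa [List.append_assoc] using this

-- ---- invariant of B's digit fold ----

def pvDInv (l : List Char) (k : Nat) (st : Int × Int) : Prop :=
  (∀ vw ∈ pvPairs, ∀ j : Nat, st.1 < (j : Int) → ¬ vw.2 <+: l.drop j)
  ∧ (∀ i : Nat, st.1 < (i : Int) → i < k → ∀ c, l[i]? = some c → PySem.Chars.isdigit c = false)
  ∧ (st = (-1, -1) ∨ ∃ j : Nat, j < l.length ∧ st.1 = (j : Int) ∧ pvHit l j = some st.2)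

lemma pv_dfold (l : List Char) : ∀ (xs : List Char) (k : Nat) (st : Int × Int),
    l.drop k = xs → pvDInv l k st →
    pvDInv l (k + xs.length)
      ((PySem.List.enumerate xs (k : Int)).foldl
        (fun (b : Int × Int) ic =>
          if PySem.Chars.isdigit ic.2 ∧ b.1 < ic.1 then (ic.1, ((ic.2.toNat : Int) - 48)) else b) st) := by
  intro xs
  induction xs with
  | nil => intro k st _ h; simpa [PySem.List.enumerate] using h
  | cons x xs ih =>
    intro k st hdrop hinv
    obtain ⟨hC1, hC2, hC3⟩ := hinv
    have hlk : l[k]? = some x := pv_getElem_of_drop hdrop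
    have hklen : k < l.length := by
      by_contra hge
      rw [List.getElem?_eq_none (by omega)] at hlk
      cases hlk
    have hdrop' : l.drop (k + 1) = xs := by
      have h1 : l.drop (k + 1) = (l.drop k).drop 1 := by
        rw [List.drop_drop]
      rw [h1, hdrop]
      rfl
    rw [PySem.List.enumerate_cons, List.foldl_cons]
    have hcast : (k : Int) + 1 = ((k + 1 : Nat) : Int) := by push_cast; ring
    rw [hcast]
    have hlen : k + (x :: xs).length = (k + 1) + xs.length := by
      simp only [List.length_cons]; omega
    rw [hlen]
    by_cases hcond : PySem.Chars.isdigit x ∧ st.1 < (k : Int)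
    · rw [if_pos hcond]
      refine ih (k + 1) _ hdrop' ⟨?_, ?_, ?_⟩
      · intro vw hvw j hj
        have hj' : st.1 < (j : Int) := lt_trans hcond.2 hj
        exact hC1 vw hvw j hj'
      · intro i hi hik c hc
        exfalso
        have h1 : (k : Int) < (i : Int) := hi
        have h2 : i < k + 1 := hik
        omega
      · right
        refine ⟨k, hklen, rfl, ?_⟩
        show pvHit l k = some ((x.toNat : Int) - 48)
        rw [pvHit_some hlk, if_pos hcond.1]
    · rw [if_neg hcond]
      refine ih (k + 1) st hdrop' ⟨hC1, ?_, hC3⟩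
      intro i hi hik c hc
      rcases Nat.lt_or_ge i k with h1 | h1
      · exact hC2 i hi h1 c hc
      · have hik' : i = k := by omega
        subst hik'
        have hxc : c = x := by
          rw [hlk] at hc
          exact (Option.some.inj hc).symm
        subst hxc
        cases hdx : PySem.Chars.isdigit c
        · rfl
        · exact absurd ⟨hdx, hi⟩ hcond

lemma pv_w_to_d (l : List Char) (st : Int × Int) (h : pvWInv l pvPairs st) :
    pvDInv l 0 st := by
  rcases h with ⟨hst, hnone⟩ | ⟨j, hjl, hst, ⟨vw, hvw, hp, hv⟩, hbound⟩
  · refine ⟨?_, by omega, Or.inl hst⟩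
    intro vw hvw j _
    exact hnone vw hvw j
  · refine ⟨?_, by omega, Or.inr ⟨j, hjl, hst, ?_⟩⟩
    · intro b hb j' hj'
      rw [hst] at hj'
      exact hbound b hb j' hj'
    · rw [hv]
      exact pv_hit_of_word hvw hp

-- ===== VERDICT (by name: the statement is the Claim_ definition above) =====
theorem get_rightmost_digit_from_line_spec : Claim_equal_get_rightmost_digit_from_line := by
  intro line _
  unfold Spec_get_rightmost_digit_from_line get_rightmost_digit_from_line
  have halt : get_rightmost_digit_from_line_alt line =
      ((PySem.List.enumerate line.toList).foldl
        (fun (b : Int × Int) ic =>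
          if PySem.Chars.isdigit ic.2 ∧ b.1 < ic.1 then (ic.1, ((ic.2.toNat : Int) - 48)) else b)
        ((PySem.List.enumerate pvWordsB).foldl
          (fun (b : Int × Int) vw =>
            let idx := PySem.Chars.rfind line.toList vw.2
            if b.1 < idx then (idx, vw.1) else b) (-1, -1))).2 := rfl
  rw [halt, pv_enum_pairs, pv_outerA_eq line.toList line.toList.length (le_refl _)]
  have hw := pv_wfold line.toList pvPairs [] (-1, -1) pv_pairs_nonempty
    (Or.inl ⟨rfl, by simp⟩)
  rw [List.nil_append] at hw
  have hd := pv_dfold line.toList line.toList 0 _ rfl (pv_w_to_d line.toList _ hw)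
  simp only [Nat.cast_zero, Nat.zero_add] at hd
  obtain ⟨hC1, hC2, hC3⟩ := hd
  rcases hC3 with hneg | ⟨j, hjl, hfst, hhit⟩
  · rw [hneg] at hC1 hC2 ⊢
    refine pv_best_none ?_
    intro i hi
    refine pv_hit_none (fun c hc => hC2 i ?_ hi c hc) (fun vw hvw => hC1 vw hvw i ?_)
    · show ((-1 : Int), (-1 : Int)).1 < (i : Int)
      simp only []
      omega
    · show ((-1 : Int), (-1 : Int)).1 < (i : Int)
      simp only []
      omega
  · refine pv_best_top hjl hhit ?_
    intro i h1 h2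
    refine pv_hit_none (fun c hc => hC2 i ?_ h2 c hc) (fun vw hvw => hC1 vw hvw i ?_)
    · rw [hfst]; exact_mod_cast h1
    · rw [hfst]; exact_mod_cast h1
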